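-- pv_equiv track=rewrite | github.com/shivavoorkonda/CFG-Context-Free-Grammar-Parser-Derivation-Tree-Generator | cyk.py | _null_combos
-- ===== SOURCE A (Python) =====
-- def _null_combos(rhs, nullable):
--     ni = [i for i, s in enumerate(rhs) if s in nullable]
--     k = len(ni)
--     results = []
--     for mask in range(1 << k):
--         exc = {ni[b] for b in range(k) if mask & (1 << b)}
--         combo = [rhs[i] for i in range(len(rhs)) if i not in exc]
--         if combo and combo not in results:
--             results.append(combo)
--     return results
-- ===== SOURCE B (Python) =====
-- def _null_combos(rhs, nullable):
--     null_set = set(nullable)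
--     idxs = [i for i, s in enumerate(rhs) if s in null_set]
--     excluded = [[]]
--     for i in idxs:
--         excluded = excluded + [e + [i] for e in excluded]
--     results = []
--     for e in excluded:
--         combo = [s for j, s in enumerate(rhs) if j not in e]
--         if combo and combo not in results:
--             results.append(combo)
--     return results
-- ===== Notes on version B (the rewrite author's own statement) =====
-- stated objective: alternative
-- what changed: Replaces the per-mask bit-decoding loop (rebuilding each exclusion set from a bitmask) with an incremental powerset construction that doubles a list of exclusion lists once per nullable index, preserving the ascending-mask order.
import Mathlib
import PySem

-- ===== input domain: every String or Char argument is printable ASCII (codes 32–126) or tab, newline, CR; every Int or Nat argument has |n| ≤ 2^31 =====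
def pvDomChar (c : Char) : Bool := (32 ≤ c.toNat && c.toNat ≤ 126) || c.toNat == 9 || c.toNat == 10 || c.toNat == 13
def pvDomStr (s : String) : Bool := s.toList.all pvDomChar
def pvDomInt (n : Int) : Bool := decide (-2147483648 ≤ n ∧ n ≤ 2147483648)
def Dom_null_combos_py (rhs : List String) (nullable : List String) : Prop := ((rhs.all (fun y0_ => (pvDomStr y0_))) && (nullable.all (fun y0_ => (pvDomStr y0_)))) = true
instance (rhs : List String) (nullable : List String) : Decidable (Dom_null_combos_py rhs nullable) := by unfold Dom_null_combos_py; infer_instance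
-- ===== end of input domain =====

-- B replaces A's per-mask bit-decoding of exclusion sets by an incremental powerset doubling
-- over the nullable indices (objective: alternative decomposition, same output order).

-- ===== PORT A =====
def null_combos_py (rhs : List String) (nullable : List String) : List (List String) :=
  let ni : List Int :=
    ((PySem.List.enumerate rhs 0).filter (fun p => nullable.contains p.2)).map (fun p => p.1)
  let k := ni.length
  (List.range (2 ^ k)).foldl (fun results mask =>
    let exc : List Int :=
      (List.range k).filterMap (fun b => if mask.testBit b then some (ni.getD b 0) else none)
    let combo : List String :=
      (PySem.List.pyRange 0 (rhs.length : Int) 1).filterMap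
        (fun i => if exc.contains i then none else some (PySem.List.pyGetD rhs i ""))
    if combo ≠ [] ∧ ¬ results.contains combo then results ++ [combo] else results) []

-- ===== PORT B =====
def null_combos_py_alt (rhs : List String) (nullable : List String) : List (List String) :=
  let nullSet : PySem.Set String := PySem.Set.ofList nullable
  let idxs : List Int :=
    ((PySem.List.enumerate rhs 0).filter (fun p => PySem.Set.contains nullSet p.2)).map (fun p => p.1)
  let excluded : List (List Int) :=
    idxs.foldl (fun acc i => acc ++ acc.map (fun e => e ++ [i])) [[]]
  excluded.foldl (fun results e =>
    let combo : List String :=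
      (PySem.List.enumerate rhs 0).filterMap
        (fun p => if e.contains p.1 then none else some p.2)
    if combo ≠ [] ∧ ¬ results.contains combo then results ++ [combo] else results) []

-- ===== PRECONDITION & SPEC =====
def Spec_null_combos_py (rhs : List String) (nullable : List String) (out : List (List String)) : Prop := out = null_combos_py_alt rhs nullable
instance (rhs : List String) (nullable : List String) (out : List (List String)) : Decidable (Spec_null_combos_py rhs nullable out) := by unfold Spec_null_combos_py; infer_instance

-- ===== CLAIM (what is proved, stated in full; the proofs are below) =====
def Claim_equal_null_combos_py : Prop := ∀ (rhs : List String) (nullable : List String), Dom_null_combos_py rhs nullable → Spec_null_combos_py rhs nullable (null_combos_py rhs nullable)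

-- ===== LEMMAS AND PROOFS =====

-- set(nullable) has the same membership test as the list nullable
theorem contains_ofList (xs : List String) (x : String) :
    PySem.Set.contains (PySem.Set.ofList xs) x = xs.contains x := by
  simp [PySem.Set.contains]

-- A's combo (index loop with rhs[i]) equals B's combo (enumerate) for the same exclusion list
theorem combo_bridge (rhs : List String) (exc : List Int) :
    (PySem.List.pyRange 0 (rhs.length : Int) 1).filterMap
      (fun i => if exc.contains i then none else some (PySem.List.pyGetD rhs i "")) =
    (PySem.List.enumerate rhs 0).filterMap
      (fun p => if exc.contains p.1 then none else some p.2) := by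
  rw [PySem.List.enumerate_eq_map_pyRange rhs "", List.filterMap_map]
  simp [PySem.List.len_eq, Function.comp]

-- the exclusion list A decodes from a bitmask
def excOf (ni : List Int) (mask : Nat) : List Int :=
  (List.range ni.length).filterMap (fun b => if mask.testBit b then some (ni.getD b 0) else none)

theorem excOf_append_lt (l : List Int) (a : Int) (m : Nat) (h : m < 2 ^ l.length) :
    excOf (l ++ [a]) m = excOf l m := by
  unfold excOf
  simp only [List.length_append, List.length_singleton, List.range_succ, List.filterMap_append]
  rw [List.filterMap_congr (g := fun b => if m.testBit b then some (l.getD b 0) else none)]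
  · simp [Nat.testBit_lt_two_pow h]
  · intro b hb
    rw [List.mem_range] at hb
    rw [List.getD_append _ _ _ _ hb]

theorem excOf_append_add (l : List Int) (a : Int) (m : Nat) (h : m < 2 ^ l.length) :
    excOf (l ++ [a]) (2 ^ l.length + m) = excOf l m ++ [a] := by
  unfold excOf
  simp only [List.length_append, List.length_singleton, List.range_succ, List.filterMap_append]
  rw [List.filterMap_congr (g := fun b => if m.testBit b then some (l.getD b 0) else none)]
  · simp [Nat.testBit_two_pow_add_eq, Nat.testBit_lt_two_pow h]
  · intro b hb
    rw [List.mem_range] at hb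
    rw [Nat.testBit_two_pow_add_gt hb, List.getD_append _ _ _ _ hb]

-- B's doubling construction enumerates exactly A's mask-decoded exclusion lists, in mask order
theorem doubling_eq (ni : List Int) :
    ni.foldl (fun acc i => acc ++ acc.map (fun e => e ++ [i])) [[]] =
    (List.range (2 ^ ni.length)).map (excOf ni) := by
  induction ni using List.reverseRecOn with
  | nil => rfl
  | append_singleton l a ih =>
    rw [List.foldl_append, List.foldl_cons, List.foldl_nil, ih]
    have h2 : 2 ^ (l ++ [a]).length = 2 ^ l.length + 2 ^ l.length := by
      simp [pow_succ]; ring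
    rw [h2, List.range_add, List.map_append, List.map_map, List.map_map]
    congr 1
    · exact List.map_congr_left (fun m hm => (excOf_append_lt l a m (List.mem_range.mp hm)).symm)
    · exact List.map_congr_left (fun m hm => by
        simp only [Function.comp_apply]
        exact (excOf_append_add l a m (List.mem_range.mp hm)).symm)

-- ===== VERDICT (by name: the statement is the Claim_ definition above) =====
theorem null_combos_py_spec : Claim_equal_null_combos_py := by
  intro rhs nullable _
  unfold Spec_null_combos_py null_combos_py null_combos_py_alt
  simp only [contains_ofList]
  rw [doubling_eq, List.foldl_map]
  simp only [combo_bridge, excOf]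
  rfl
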